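-- pv_equiv track=rewrite | github.com/KuangHu/RNA_guide_editor_finder | modules/alignment_filter.py | count_gap_opens
-- ===== SOURCE A (Python) =====
-- def count_gap_opens(alignment_string: str) -> int:
--     """Count gap-open events (non-gap -> gap transitions) in an alignment string.
--
--     Gaps are represented as spaces ' ' in the alignment string.
--     """
--     if not alignment_string:
--         return 0
--     opens = 0
--     in_gap = False
--     for ch in alignment_string:
--         if ch == ' ':
--             if not in_gap:
--                 opens += 1
--                 in_gap = True
--         else:
--             in_gap = False
--     return opens
-- ===== SOURCE B (Python) =====
-- def count_gap_opens(alignment_string: str) -> int: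
--     """Count gap-open events via run-length decomposition: compress the string
--     into one representative character per maximal run, then count space runs."""
--     runs = []
--     prev = None
--     for ch in alignment_string:
--         if ch != prev:
--             runs.append(ch)
--             prev = ch
--     return runs.count(' ')
-- ===== Notes on version B (the rewrite author's own statement) =====
-- stated objective: alternative
-- what changed: Replaces the in_gap boolean state machine with a run-length decomposition: compress the string to one character per maximal run, then count the space runs; the empty string needs no special guard.
import Mathlib
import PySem

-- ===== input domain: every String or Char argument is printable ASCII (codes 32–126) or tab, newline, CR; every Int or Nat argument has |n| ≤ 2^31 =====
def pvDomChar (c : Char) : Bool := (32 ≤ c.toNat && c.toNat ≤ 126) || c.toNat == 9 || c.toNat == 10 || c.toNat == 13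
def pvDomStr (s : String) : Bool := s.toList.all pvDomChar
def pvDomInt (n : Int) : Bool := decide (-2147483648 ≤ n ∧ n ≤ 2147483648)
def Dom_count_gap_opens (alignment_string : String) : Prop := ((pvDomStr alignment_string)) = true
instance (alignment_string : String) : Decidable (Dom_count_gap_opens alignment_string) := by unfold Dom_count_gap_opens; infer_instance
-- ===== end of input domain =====

-- B replaces A's in_gap state-machine with a run-length decomposition (compress runs, count space runs); same cost, different decomposition.

-- ===== PORT A =====
-- the for-loop over characters, state (opens, in_gap)
def cgoLoopA (cs : List Char) (opens : Int) (in_gap : Bool) : Int :=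
  match cs with
  | [] => opens
  | c :: rest =>
    if c = ' ' then
      if !in_gap then cgoLoopA rest (opens + 1) true
      else cgoLoopA rest opens true
    else cgoLoopA rest opens false

def count_gap_opens (alignment_string : String) : Int :=
  if alignment_string = "" then 0
  else cgoLoopA alignment_string.toList 0 false

-- ===== PORT B =====
-- the for-loop building `runs` (one representative char per maximal run), state (runs, prev)
def cgoLoopB (cs : List Char) (runs : List Char) (prev : Option Char) : List Char × Option Char :=
  match cs with
  | [] => (runs, prev)
  | c :: rest =>
    if some c ≠ prev then cgoLoopB rest (runs ++ [c]) (some c)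
    else cgoLoopB rest runs prev

def count_gap_opens_alt (alignment_string : String) : Int :=
  ((cgoLoopB alignment_string.toList [] none).1.count ' ' : Int)

-- ===== PRECONDITION & SPEC =====
def Spec_count_gap_opens (alignment_string : String) (out : Int) : Prop := out = count_gap_opens_alt alignment_string
instance (alignment_string : String) (out : Int) : Decidable (Spec_count_gap_opens alignment_string out) := by unfold Spec_count_gap_opens; infer_instance

-- ===== CLAIM (what is proved, stated in full; the proofs are below) =====
def Claim_equal_count_gap_opens : Prop := ∀ (alignment_string : String), Dom_count_gap_opens alignment_string → Spec_count_gap_opens alignment_string (count_gap_opens alignment_string)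

-- ===== LEMMAS AND PROOFS =====

-- common reference count: number of space-run starts in cs, given whether we are currently inside a space run
def cgoN (cs : List Char) (flag : Bool) : Int :=
  match cs with
  | [] => 0
  | c :: rest => (if c = ' ' ∧ flag = false then 1 else 0) + cgoN rest (c = ' ')

theorem cgoLoopA_eq_N (cs : List Char) (opens : Int) (flag : Bool) :
    cgoLoopA cs opens flag = opens + cgoN cs flag := by
  induction cs generalizing opens flag with
  | nil => simp [cgoLoopA, cgoN]
  | cons c rest ih =>
    by_cases hc : c = ' ' <;> cases flag <;>
      simp [cgoLoopA, cgoN, hc, ih] <;> ring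

theorem cgoLoopB_count (cs : List Char) (runs : List Char) (prev : Option Char) :
    ((cgoLoopB cs runs prev).1.count ' ' : Int)
      = (runs.count ' ' : Int) + cgoN cs (prev == some ' ') := by
  induction cs generalizing runs prev with
  | nil => simp [cgoLoopB, cgoN]
  | cons c rest ih =>
    simp only [cgoLoopB]
    by_cases hp : some c = prev
    · rw [if_neg (by simp [hp]), ih]
      have hflag : (prev == some ' ') = decide (c = ' ') := by
        subst hp; by_cases hc : c = ' ' <;> simp [hc]
      rw [hflag]
      by_cases hc : c = ' ' <;> simp [cgoN, hc]
    · rw [if_pos (by simp [hp]), ih]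
      by_cases hc : c = ' '
      · subst hc
        have hflag : (prev == some ' ') = false := by
          cases prev with
          | none => rfl
          | some d =>
            have hd : ¬ d = ' ' := fun h => hp (by rw [h])
            simp [hd]
        simp [cgoN, hflag, List.count_append]
        ring
      · have h2 : (runs ++ [c]).count ' ' = runs.count ' ' := by
          simp [List.count_append, List.count_singleton]
          omega
        have h3 : (c == ' ') = false := by simp [hc]
        simp [cgoN, hc, h2, h3]

-- ===== VERDICT (by name: the statement is the Claim_ definition above) =====
theorem count_gap_opens_spec : Claim_equal_count_gap_opens := by
  intro s _
  unfold Spec_count_gap_opens count_gap_opens count_gap_opens_alt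
  by_cases hs : s = ""
  · subst hs; simp [cgoLoopB]
  · simp [hs, cgoLoopA_eq_N, cgoLoopB_count]
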